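-- pv_equiv track=rewrite | github.com/olsenw/LeetCodeExercises | Python3/apply_operations_to_maximize_score.py | maximumScore_fails
-- ===== SOURCE A (Python) =====
-- import math
-- from typing import List, Dict, Set, Optional
--
-- def maximumScore_fails(nums: List[int], k: int) -> int:
--     # https://www.geeksforgeeks.org/python-program-for-efficient-program-to-print-all-prime-factors-of-a-given-number/
--     def primScore(n:int) -> int:
--         factors = set()
--         while n % 2 == 0:
--             factors.add(2)
--             n //= 2
--         for i in range(3, int(math.sqrt(n))+1, 2):
--             while n % i == 0:
--                 factors.add(i)
--                 n //= i
--         if n > 2: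
--             factors.add(n)
--         return len(factors)
--     answer = 1
--     heap = sorted(((primScore(n),n) for n in nums), reverse=True)
--     pass
--     for i,j in heap[:min(k, len(heap))]:
--         answer *= j
--     return answer % (10**5 + 7)
-- ===== SOURCE B (Python) =====
-- import math
--
-- def maximumScore_fails(nums, k):
--     # Sieve the primes up to isqrt(max(nums)) once, then count each number's
--     # distinct prime factors by dividing along that prime list (counter, no set).
--     if not nums:
--         return 1
--     limit = math.isqrt(max(nums))
--     is_comp = [False] * (limit + 1)
--     primes = []
--     for p in range(2, limit + 1):
--         if not is_comp[p]:
--             primes.append(p)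
--             for m in range(p * p, limit + 1, p):
--                 is_comp[m] = True
--
--     def omega(n):
--         count = 0
--         for p in primes:
--             if p * p > n:
--                 break
--             if n % p == 0:
--                 count += 1
--                 while n % p == 0:
--                     n //= p
--         if n > 1:
--             count += 1
--         return count
--
--     pairs = sorted(((omega(n), n) for n in nums), reverse=True)
--     answer = 1
--     for _, n in pairs[:k]:
--         answer *= n
--     return answer % (10**5 + 7)
-- ===== Notes on version B (the rewrite author's own statement) =====
-- stated objective: alternative
-- what changed: Replaces A's per-element trial division over all odd candidates up to sqrt(n) (collecting a set) with one shared sieve of Eratosthenes computing the primes up to isqrt(max(nums)), then counts each element's distinct prime factors with an integer counter by dividing along that prime list with an early break once p*p exceeds the remaining cofactor (intended as faster; a timing run could not obtain a clean ratio: A timed out at n=256 where B returned).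
import Mathlib
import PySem

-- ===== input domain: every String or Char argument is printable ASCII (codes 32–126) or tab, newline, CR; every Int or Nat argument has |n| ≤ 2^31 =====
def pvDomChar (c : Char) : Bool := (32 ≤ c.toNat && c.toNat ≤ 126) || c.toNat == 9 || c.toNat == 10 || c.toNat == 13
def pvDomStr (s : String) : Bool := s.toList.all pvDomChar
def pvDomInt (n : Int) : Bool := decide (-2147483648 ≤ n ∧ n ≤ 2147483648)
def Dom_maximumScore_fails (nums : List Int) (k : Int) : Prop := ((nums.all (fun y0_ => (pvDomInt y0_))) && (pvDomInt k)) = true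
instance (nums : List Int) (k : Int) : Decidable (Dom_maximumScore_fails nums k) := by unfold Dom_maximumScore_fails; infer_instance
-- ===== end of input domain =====

-- B replaces A's per-element odd-candidate trial division (collecting a set of factors) by one
-- shared sieve of Eratosthenes up to isqrt(max(nums)) plus a counter-based distinct-prime count
-- (a different algorithm of the same task; return values proved equal on Pre_).

-- ===== PORT A =====
-- 'while n % p == 0: factors.add(p); n //= p'.  The conjuncts 2 ≤ p and 1 ≤ n only make the
-- recursion total; on every input admitted by Pre_ the Python loop runs with p ∈ {2} ∪ {odd i ≥ 3}
-- and n ≥ 1, where they always hold, so this is exact there.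
def pvStripSet (p n : Int) (fs : PySem.Set Int) : Int × PySem.Set Int :=
  if h : PySem.Int.mod n p = 0 ∧ 2 ≤ p ∧ 1 ≤ n then
    pvStripSet p (PySem.Int.floordiv n p) (PySem.Set.add fs p)
  else (n, fs)
termination_by n.toNat
decreasing_by
  obtain ⟨h0, hp, hn⟩ := h
  rw [PySem.Int.floordiv_eq_ediv_of_pos (by omega)]
  have h1 : n / p < n := by rw [Int.ediv_lt_iff_lt_mul (by omega)]; nlinarith
  have h2 : 0 ≤ n / p := Int.ediv_nonneg (by omega) (by omega)
  omega

-- the nested 'def primScore'; int(math.sqrt(n)) equals Nat.sqrt n for every 0 ≤ n ≤ 2^31 (the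
-- double sqrt is exact on that range), and Pre_ keeps the argument nonnegative.
def pvPrimScore (n : Int) : Int :=
  let st1 := pvStripSet 2 n PySem.Set.empty
  let s : Int := (Nat.sqrt st1.1.toNat : Int)
  let st2 := (PySem.List.pyRange 3 (s + 1) 2).foldl (fun st i => pvStripSet i st.1 st.2) st1
  let fs := if 2 < st2.1 then PySem.Set.add st2.2 st2.1 else st2.2
  (fs.length : Int)

def maximumScore_fails (nums : List Int) (k : Int) : Int :=
  let heap := PySem.List.sorted2 (nums.map fun n => (pvPrimScore n, n)) Prod.fst Prod.snd true
  let answer := (PySem.List.slice heap none (some (min k (PySem.List.len heap)))).foldl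
    (fun acc ij => acc * ij.2) 1
  PySem.Int.mod answer (10 ^ 5 + 7)

-- ===== PORT B =====
-- 'while n % p == 0: n //= p' (same totality guard as pvStripSet above).
def pvStrip (p n : Int) : Int :=
  if h : PySem.Int.mod n p = 0 ∧ 2 ≤ p ∧ 1 ≤ n then pvStrip p (PySem.Int.floordiv n p)
  else n
termination_by n.toNat
decreasing_by
  obtain ⟨h0, hp, hn⟩ := h
  rw [PySem.Int.floordiv_eq_ediv_of_pos (by omega)]
  have h1 : n / p < n := by rw [Int.ediv_lt_iff_lt_mul (by omega)]; nlinarith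
  have h2 : 0 ≤ n / p := Int.ediv_nonneg (by omega) (by omega)
  omega

-- sieve of Eratosthenes over is_comp = [False]*(limit+1), collecting primes in order
def pvSieve (limit : Int) : List Int :=
  let init := PySem.List.pyRepeat [false] (limit + 1)
  ((PySem.List.pyRange 2 (limit + 1) 1).foldl
    (fun st p =>
      if PySem.List.pyGetD st.1 p false then st
      else
        ((PySem.List.pyRange (p * p) (limit + 1) p).foldl
            (fun l m => PySem.List.pySetD l m true) st.1,
          st.2 ++ [p]))
    (init, [])).2

-- the sieve loop invariant after processing candidates 2, …, j-1

-- 'for p in primes: if p*p > n: break; if n % p == 0: count += 1; strip p from n'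
def pvOmegaGo : List Int → Int → Int → Int × Int
  | [], n, c => (n, c)
  | p :: ps, n, c =>
    if p * p > n then (n, c)
    else if PySem.Int.mod n p = 0 then pvOmegaGo ps (pvStrip p n) (c + 1)
    else pvOmegaGo ps n c

-- the nested 'def omega'
def pvOmega (primes : List Int) (n : Int) : Int :=
  let r := pvOmegaGo primes n 0
  if 1 < r.1 then r.2 + 1 else r.2

def maximumScore_fails_alt (nums : List Int) (k : Int) : Int :=
  match nums with
  | [] => 1
  | x :: t =>
    let limit : Int := (Nat.sqrt ((t.foldl max x).toNat) : Int)
    let primes := pvSieve limit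
    let pairs := PySem.List.sorted2 (nums.map fun n => (pvOmega primes n, n)) Prod.fst Prod.snd true
    let answer := (PySem.List.slice pairs none (some k)).foldl (fun acc p => acc * p.2) 1
    PySem.Int.mod answer (10 ^ 5 + 7)

-- ===== PRECONDITION & SPEC =====
-- Pre_ excludes lists with a nonpositive element: on those Python A never returns a value
-- (an element 0 makes 'while n % 2 == 0' loop forever; a negative element reaches
-- math.sqrt of a negative number, which raises ValueError).
def Pre_maximumScore_fails (nums : List Int) (k : Int) : Prop := ∀ x ∈ nums, 1 ≤ x
instance (nums : List Int) (k : Int) : Decidable (Pre_maximumScore_fails nums k) := by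
  unfold Pre_maximumScore_fails; infer_instance

def pvWitness_maximumScore_fails : List Int × Int := ([6, 10, 3], 2)

def Spec_maximumScore_fails (nums : List Int) (k : Int) (out : Int) : Prop :=
  out = maximumScore_fails_alt nums k
instance (nums : List Int) (k : Int) (out : Int) : Decidable (Spec_maximumScore_fails nums k out) := by
  unfold Spec_maximumScore_fails; infer_instance

-- ===== CLAIM (what is proved, stated in full; the proofs are below) =====
def Claim_equal_maximumScore_fails : Prop := ∀ (nums : List Int) (k : Int),
  Dom_maximumScore_fails nums k → Pre_maximumScore_fails nums k →
  Spec_maximumScore_fails nums k (maximumScore_fails nums k)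

-- ===== LEMMAS AND PROOFS =====
-- Nat-side model of the stripping while-loop
def sstrip (p n : Nat) : Nat :=
  if h : 2 ≤ p ∧ p ∣ n ∧ 1 ≤ n then sstrip p (n / p) else n
termination_by n
decreasing_by exact Nat.div_lt_self (by omega) (by omega)

lemma pvStrip_eq_sstrip (p n : Int) (hp : 2 ≤ p) (hn : 1 ≤ n) :
    pvStrip p n = (sstrip p.toNat n.toNat : Int) := by
  lift p to ℕ using (by omega) with P
  lift n to ℕ using (by omega) with N
  have main : ∀ (B : Nat) (n : Nat), n ≤ B → 1 ≤ n →
      pvStrip (P : Int) (n : Int) = (sstrip P n : Int) := by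
    intro B
    induction B with
    | zero => intro n h h1; omega
    | succ B ih =>
      intro n hle h1
      rw [pvStrip, sstrip]
      by_cases hd : P ∣ n
      · have hm : PySem.Int.mod (n : Int) (P : Int) = 0 := by
          rw [PySem.Int.mod_eq_zero_iff_dvd]; exact_mod_cast hd
        rw [dif_pos ⟨hm, by exact_mod_cast hp, by exact_mod_cast h1⟩,
            dif_pos ⟨by exact_mod_cast hp, hd, h1⟩]
        have hfd : PySem.Int.floordiv (n : Int) (P : Int) = ((n / P : Nat) : Int) := by
          exact_mod_cast PySem.Int.floordiv_natCast n P
        rw [hfd]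
        have hPpos : 2 ≤ P := by exact_mod_cast hp
        have hlt : n / P < n := Nat.div_lt_self (by omega) (by omega)
        exact ih (n / P) (by omega) (Nat.one_le_div_iff (by omega) |>.2 (Nat.le_of_dvd (by omega) hd))
      · have hm : ¬ PySem.Int.mod (n : Int) (P : Int) = 0 := by
          rw [PySem.Int.mod_eq_zero_iff_dvd]; exact_mod_cast hd
        rw [dif_neg (by tauto), dif_neg (by tauto)]
  simpa using main N N le_rfl (by exact_mod_cast hn)

lemma set_add_mem {s : PySem.Set Int} {x : Int} (h : x ∈ s) : PySem.Set.add s x = s := by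
  simp [PySem.Set.add, PySem.Set.contains, h]

lemma set_add_not_mem {s : PySem.Set Int} {x : Int} (h : ¬ x ∈ s) :
    PySem.Set.add s x = s ++ [x] := by
  simp [PySem.Set.add, PySem.Set.contains, h]

lemma pvStripSet_eq (p n : Int) (fs : PySem.Set Int) (hp : 2 ≤ p) (hn : 1 ≤ n) :
    pvStripSet p n fs =
      ((sstrip p.toNat n.toNat : Int), if p ∣ n then PySem.Set.add fs p else fs) := by
  lift p to ℕ using (by omega) with P
  lift n to ℕ using (by omega) with N
  have main : ∀ (B : Nat) (n : Nat) (fs : PySem.Set Int), n ≤ B → 1 ≤ n →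
      pvStripSet (P : Int) (n : Int) fs =
        ((sstrip P n : Int), if (P : Int) ∣ (n : Int) then PySem.Set.add fs (P : Int) else fs) := by
    intro B
    induction B with
    | zero => intro n fs h h1; omega
    | succ B ih =>
      intro n fs hle h1
      rw [pvStripSet, sstrip]
      by_cases hd : P ∣ n
      · have hdi : (P : Int) ∣ (n : Int) := by exact_mod_cast hd
        have hm : PySem.Int.mod (n : Int) (P : Int) = 0 := by
          rw [PySem.Int.mod_eq_zero_iff_dvd]; exact hdi
        rw [dif_pos ⟨hm, by exact_mod_cast hp, by exact_mod_cast h1⟩,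
            dif_pos ⟨by exact_mod_cast hp, hd, h1⟩]
        have hfd : PySem.Int.floordiv (n : Int) (P : Int) = ((n / P : Nat) : Int) := by
          exact_mod_cast PySem.Int.floordiv_natCast n P
        rw [hfd]
        have hPpos : 2 ≤ P := by exact_mod_cast hp
        have hlt : n / P < n := Nat.div_lt_self (by omega) (by omega)
        rw [ih (n / P) _ (by omega)
            (Nat.one_le_div_iff (by omega) |>.2 (Nat.le_of_dvd (by omega) hd))]
        have hidem : ∀ b : PySem.Set Int,
            (if (P : Int) ∣ ((n / P : Nat) : Int) then PySem.Set.add (PySem.Set.add fs (P:Int)) (P:Int)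
             else PySem.Set.add fs (P:Int)) = PySem.Set.add fs (P : Int) := by
          intro _
          split
          · exact set_add_mem (by simp [PySem.Set.mem_add])
          · rfl
        rw [hidem fs, if_pos hdi]
      · have hm : ¬ PySem.Int.mod (n : Int) (P : Int) = 0 := by
          rw [PySem.Int.mod_eq_zero_iff_dvd]; exact_mod_cast hd
        have hdi : ¬ (P : Int) ∣ (n : Int) := by exact_mod_cast hd
        rw [dif_neg (by tauto), dif_neg (by tauto), if_neg hdi]
  simpa using main N N fs le_rfl (by exact_mod_cast hn)

lemma sstrip_pos {p n : Nat} (hn : 1 ≤ n) : 1 ≤ sstrip p n := by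
  induction n using sstrip.induct p with
  | case1 n h ih =>
    rw [sstrip, dif_pos h]
    exact ih (Nat.one_le_div_iff (by omega) |>.2 (Nat.le_of_dvd (by omega) h.2.1))
  | case2 n h => rw [sstrip, dif_neg h]; exact hn

lemma sstrip_dvd (p n : Nat) : sstrip p n ∣ n := by
  induction n using sstrip.induct p with
  | case1 n h ih =>
    rw [sstrip, dif_pos h]
    exact ih.trans (Nat.div_dvd_of_dvd h.2.1)
  | case2 n h => rw [sstrip, dif_neg h]

lemma sstrip_not_dvd {p n : Nat} (hp : 2 ≤ p) (hn : 1 ≤ n) : ¬ p ∣ sstrip p n := by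
  induction n using sstrip.induct p with
  | case1 n h ih =>
    rw [sstrip, dif_pos h]
    exact fun hc => (ih (Nat.one_le_div_iff (by omega) |>.2 (Nat.le_of_dvd (by omega) h.2.1))) hc
  | case2 n h =>
    rw [sstrip, dif_neg h]
    intro hc; exact h ⟨hp, hc, hn⟩

lemma sstrip_of_not_dvd {p n : Nat} (h : ¬ p ∣ n) : sstrip p n = n := by
  rw [sstrip, dif_neg (by tauto)]

lemma sstrip_primeFactors {p n : Nat} (hp : p.Prime) (hn : 1 ≤ n) :
    (sstrip p n).primeFactors = n.primeFactors.erase p := by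
  induction n using sstrip.induct p with
  | case1 n h ih =>
    rw [sstrip, dif_pos h]
    have h1 : 1 ≤ n / p := Nat.one_le_div_iff (by omega) |>.2 (Nat.le_of_dvd (by omega) h.2.1)
    rw [ih h1]
    have hmul : n = p * (n / p) := (Nat.mul_div_cancel' h.2.1).symm
    ext q
    have : n.primeFactors = p.primeFactors ∪ (n / p).primeFactors := by
      conv_lhs => rw [hmul]
      exact Nat.primeFactors_mul (by omega) (by omega)
    simp only [this, hp.primeFactors, Finset.mem_erase, Finset.mem_union, Finset.mem_singleton]
    tauto
  | case2 n h =>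
    rw [sstrip, dif_neg h]
    have : p ∉ n.primeFactors := by
      intro hc
      exact h ⟨hp.two_le, Nat.dvd_of_mem_primeFactors hc, hn⟩
    exact (Finset.erase_eq_of_notMem this).symm

-- a number all of whose prime factors q satisfy n < q*q is 1 or prime
lemma card_primeFactors_of_large (n : Nat) (hn : 1 ≤ n)
    (h : ∀ q : Nat, q.Prime → q ∣ n → n < q * q) :
    n.primeFactors.card = if 1 < n then 1 else 0 := by
  rcases Nat.lt_or_ge n 2 with h2 | h2
  · have : n = 1 := by omega
    subst this; simp
  · have hq := Nat.minFac_prime (by omega : n ≠ 1)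
    have hprime : n.Prime := by
      by_contra hnp
      have := Nat.minFac_sq_le_self (by omega) hnp
      have := h n.minFac hq (Nat.minFac_dvd n)
      nlinarith [this]
    rw [hprime.primeFactors, if_pos (by omega)]
    simp

lemma pyRange_cons_two {a b : Int} (h : a < b) :
    PySem.List.pyRange a b 2 = a :: PySem.List.pyRange (a + 2) b 2 := by
  rw [PySem.List.pyRange_of_pos a b (by omega), PySem.List.pyRange_of_pos (a+2) b (by omega)]
  rw [if_pos h]
  have hm : ((b - a + 2 - 1) / 2).toNat =
      ((if a + 2 < b then ((b - (a + 2) + 2 - 1) / 2).toNat else 0)) + 1 := by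
    split <;> omega
  rw [hm, List.range_succ_eq_map]
  simp only [List.map_cons, List.map_map]
  congr 1
  · simp
  · apply List.map_congr_left
    intro k _
    simp [Function.comp]
    ring

lemma pyRange_two_nil {a b : Int} (h : b ≤ a) : PySem.List.pyRange a b 2 = [] := by
  rw [PySem.List.pyRange_of_pos a b (by omega), if_neg (by omega)]
  simp

-- the state of A's odd-candidate loop

-- the state of A's odd-candidate loop
def afoldR (s a m : Int) (fs : List Int) : Int × List Int :=
  (PySem.List.pyRange a (s + 1) 2).foldl (fun st i => pvStripSet i st.1 st.2) (m, fs)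

lemma afold (s : Int) : ∀ (cnt : Nat) (a m : Int) (fs : List Int),
    (s + 1 - a).toNat ≤ cnt → 3 ≤ a → a % 2 = 1 → 1 ≤ m →
    (∀ q : Nat, q.Prime → (q : Int) ∣ m → a ≤ (q : Int)) →
    (∀ x ∈ fs, x < a) →
    1 ≤ (afoldR s a m fs).1 ∧ (afoldR s a m fs).1 ∣ m ∧
      (afoldR s a m fs).1.toNat.primeFactors =
        Finset.filter (fun q : Nat => s < (q : Int)) m.toNat.primeFactors ∧
      (afoldR s a m fs).2.length =
        fs.length + (Finset.filter (fun q : Nat => (q : Int) ≤ s) m.toNat.primeFactors).card ∧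
      (∀ x ∈ (afoldR s a m fs).2, x ∈ fs ∨ (3 ≤ x ∧ x ≤ s)) := by
  intro cnt
  induction cnt with
  | zero =>
    intro a m fs hcnt h3 hodd hm hq hfs
    have hempty : PySem.List.pyRange a (s + 1) 2 = [] := pyRange_two_nil (by omega)
    have hr : afoldR s a m fs = (m, fs) := by rw [afoldR, hempty]; rfl
    rw [hr]
    have hall : ∀ q : Nat, q ∈ m.toNat.primeFactors → s < (q : Int) := by
      intro q hqm
      rcases Nat.mem_primeFactors.1 hqm with ⟨hqp, hqd, _⟩
      have : (q : Int) ∣ m := by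
        have : m = ((m.toNat : Nat) : Int) := by omega
        rw [this]; exact_mod_cast hqd
      have := hq q hqp this
      omega
    refine ⟨hm, dvd_rfl, ?_, ?_, fun x hx => Or.inl hx⟩
    · exact (Finset.filter_eq_self.2 hall).symm
    · have : Finset.filter (fun q : Nat => (q : Int) ≤ s) m.toNat.primeFactors = ∅ := by
        apply Finset.filter_eq_empty_iff.2
        intro q hqm
        have := hall q hqm
        omega
      rw [this]
      simp
  | succ cnt ih =>
    intro a m fs hcnt h3 hodd hm hq hfs
    by_cases hab : a < s + 1
    case neg =>
      -- same as the empty case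
      have hempty : PySem.List.pyRange a (s + 1) 2 = [] := pyRange_two_nil (by omega)
      have hr : afoldR s a m fs = (m, fs) := by rw [afoldR, hempty]; rfl
      rw [hr]
      have hall : ∀ q : Nat, q ∈ m.toNat.primeFactors → s < (q : Int) := by
        intro q hqm
        rcases Nat.mem_primeFactors.1 hqm with ⟨hqp, hqd, _⟩
        have : (q : Int) ∣ m := by
          have : m = ((m.toNat : Nat) : Int) := by omega
          rw [this]; exact_mod_cast hqd
        have := hq q hqp this
        omega
      refine ⟨hm, dvd_rfl, ?_, ?_, fun x hx => Or.inl hx⟩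
      · exact (Finset.filter_eq_self.2 hall).symm
      · have : Finset.filter (fun q : Nat => (q : Int) ≤ s) m.toNat.primeFactors = ∅ := by
          apply Finset.filter_eq_empty_iff.2
          intro q hqm
          have := hall q hqm
          omega
        rw [this]
        simp
    case pos =>
      have hstep : afoldR s a m fs = afoldR s (a + 2) (pvStripSet a m fs).1 (pvStripSet a m fs).2 := by
        rw [afoldR, pyRange_cons_two hab, List.foldl_cons]; rfl
      have hnotnext : ∀ (q : Nat), q.Prime → (q:Int) ≠ a → a ≤ (q:Int) → a + 2 ≤ (q:Int) := by
        intro q hqp hne hge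
        rcases Nat.Prime.eq_two_or_odd hqp with h2 | hoddq
        · subst h2; omega
        · have : ((q : Int)) % 2 = 1 := by omega
          omega
      have hmN : ((m.toNat : Nat) : Int) = m := by omega
      by_cases hd : a ∣ m
      · -- candidate a divides: a is prime here
        have haN : (2:Nat) ≤ a.toNat := by omega
        have hap : a.toNat.Prime := by
          by_contra hnp
          have hlt : a.toNat.minFac < a.toNat := (Nat.not_prime_iff_minFac_lt haN).mp hnp
          have hqp := Nat.minFac_prime (show a.toNat ≠ 1 by omega)
          have hdm : (a.toNat.minFac : Int) ∣ m := by
            have h1 : (a.toNat.minFac : Int) ∣ a := by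
              have : ((a.toNat : Nat) : Int) = a := by omega
              rw [← this]; exact_mod_cast a.toNat.minFac_dvd
            exact h1.trans hd
          have := hq _ hqp hdm
          omega
        obtain ⟨m', hm'cast⟩ : ∃ m', ((sstrip a.toNat m.toNat : Nat) : Int) = m' := ⟨_, rfl⟩
        have hfseq : pvStripSet a m fs = (m', fs ++ [a]) := by
          rw [pvStripSet_eq a m fs (by omega) hm, if_pos hd,
              set_add_not_mem (fun hc => absurd (hfs a hc) (by omega)), hm'cast]
        have hm'N : m'.toNat = sstrip a.toNat m.toNat := by omega
        have hm'1 : 1 ≤ m' := by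
          have := sstrip_pos (p := a.toNat) (n := m.toNat) (by omega)
          omega
        have hm'dvd : m' ∣ m := by
          rw [← hm'cast, ← hmN]
          exact_mod_cast sstrip_dvd a.toNat m.toNat
        have hm'pf : m'.toNat.primeFactors = m.toNat.primeFactors.erase a.toNat := by
          rw [hm'N]; exact sstrip_primeFactors hap (by omega)
        have hq' : ∀ q : Nat, q.Prime → (q : Int) ∣ m' → a + 2 ≤ (q : Int) := by
          intro q hqp hqd
          have hge := hq q hqp (hqd.trans hm'dvd)
          refine hnotnext q hqp ?_ hge
          intro he
          apply sstrip_not_dvd (p := a.toNat) (n := m.toNat) haN (by omega)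
          have hqm' : q ∣ m'.toNat := by
            have : ((q:Int)) ∣ ((m'.toNat : Nat) : Int) := by
              rwa [show ((m'.toNat : Nat) : Int) = m' by omega]
            exact_mod_cast this
          rw [hm'N] at hqm'
          rwa [show q = a.toNat by omega] at hqm'
        have hres := ih (a + 2) m' (fs ++ [a]) (by omega) (by omega) (by omega) hm'1 hq' ?side
        case side =>
          intro x hx
          rcases List.mem_append.1 hx with h | h
          · have := hfs x h; omega
          · simp only [List.mem_singleton] at h; omega
        obtain ⟨R1, R2, R3, R4, R5⟩ := hres
        rw [hstep, hfseq]
        have haS : a ≤ s := by omega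
        have haNmem : a.toNat ∈ m.toNat.primeFactors := by
          rw [Nat.mem_primeFactors]
          refine ⟨hap, ?_, by omega⟩
          have : ((a.toNat : Nat) : Int) ∣ ((m.toNat : Nat) : Int) := by
            rw [hmN, show ((a.toNat : Nat) : Int) = a by omega]; exact hd
          exact_mod_cast this
        refine ⟨R1, R2.trans hm'dvd, ?_, ?_, ?_⟩
        · rw [R3, hm'pf, Finset.filter_erase]
          apply Finset.erase_eq_of_notMem
          simp only [Finset.mem_filter]
          rintro ⟨-, hlt⟩
          omega
        · rw [R4, hm'pf, Finset.filter_erase]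
          have hmemf : a.toNat ∈ Finset.filter (fun q : Nat => (q : Int) ≤ s) m.toNat.primeFactors := by
            simp only [Finset.mem_filter]
            exact ⟨haNmem, by omega⟩
          rw [Finset.card_erase_of_mem hmemf]
          have hpos : 0 < (Finset.filter (fun q : Nat => (q : Int) ≤ s) m.toNat.primeFactors).card :=
            Finset.card_pos.2 ⟨a.toNat, hmemf⟩
          simp only [List.length_append, List.length_singleton]
          omega
        · intro x hx
          rcases R5 x hx with h | h
          · rcases List.mem_append.1 h with h' | h'
            · exact Or.inl h'
            · simp only [List.mem_singleton] at h'
              exact Or.inr ⟨by omega, by omega⟩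
          · exact Or.inr h
      · -- candidate a does not divide: no-op step
        have hfseq : pvStripSet a m fs = (m, fs) := by
          rw [pvStripSet_eq a m fs (by omega) hm, if_neg hd]
          have : ¬ a.toNat ∣ m.toNat := by
            intro hc
            apply hd
            have : ((a.toNat : Nat) : Int) ∣ ((m.toNat : Nat) : Int) := by exact_mod_cast hc
            rwa [hmN, show ((a.toNat : Nat) : Int) = a by omega] at this
          rw [sstrip_of_not_dvd this, hmN]
        have hq' : ∀ q : Nat, q.Prime → (q : Int) ∣ m → a + 2 ≤ (q : Int) := by
          intro q hqp hqd
          refine hnotnext q hqp ?_ (hq q hqp hqd)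
          intro he
          apply hd
          rwa [← he]
        rw [hstep, hfseq]
        exact ih (a + 2) m fs (by omega) (by omega) (by omega) hm hq' (by
          intro x hx; have := hfs x hx; omega)

lemma filter_card_split (S : Finset ℕ) (s : Int) :
    (Finset.filter (fun q : Nat => (q : Int) ≤ s) S).card +
      (Finset.filter (fun q : Nat => s < (q : Int)) S).card = S.card := by
  have := Finset.filter_card_add_filter_neg_card_eq_card
    (s := S) (p := fun q : Nat => (q : Int) ≤ s)
  simpa using this

lemma primScore_eq (n : Int) (h1 : 1 ≤ n) :
    pvPrimScore n = (n.toNat.primeFactors.card : Int) := by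
  have hmN : ((n.toNat : Nat) : Int) = n := by omega
  have e1 : pvStripSet 2 n PySem.Set.empty =
      ((sstrip 2 n.toNat : Int), if (2:Int) ∣ n then [2] else []) := by
    rw [pvStripSet_eq 2 n PySem.Set.empty (by omega) h1]
    rfl
  have hn1 : 1 ≤ sstrip 2 n.toNat := sstrip_pos (by omega)
  have hn1dvd : sstrip 2 n.toNat ∣ n.toNat := sstrip_dvd _ _
  have hn1not2 : ¬ 2 ∣ sstrip 2 n.toNat := sstrip_not_dvd (by omega) (by omega)
  have hn1pf : (sstrip 2 n.toNat).primeFactors = n.toNat.primeFactors.erase 2 :=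
    sstrip_primeFactors Nat.prime_two (by omega)
  simp only [pvPrimScore, e1, Int.toNat_natCast]
  set n1N : Nat := sstrip 2 n.toNat with hn1def
  set fs1 : List Int := if (2:Int) ∣ n then [2] else [] with hfs1def
  set s : Int := ((Nat.sqrt n1N : Nat) : Int) with hsdef
  have hsN : s = ((Nat.sqrt n1N : Nat) : Int) := hsdef
  have hfold : (PySem.List.pyRange 3 (s + 1) 2).foldl
      (fun st i => pvStripSet i st.1 st.2) ((n1N : Int), fs1) = afoldR s 3 (n1N : Int) fs1 := rfl
  have hres := afold s (s + 1 - 3).toNat 3 ((n1N : Int)) fs1 le_rfl (by omega) (by omega)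
    (by exact_mod_cast hn1) ?hq ?hfs
  case hq =>
    intro q hqp hqd
    have hqdN : q ∣ n1N := by exact_mod_cast hqd
    have : q ≠ 2 := fun he => hn1not2 (he ▸ hqdN)
    have := hqp.two_le
    omega
  case hfs =>
    intro x hx
    rw [hfs1def] at hx
    split at hx
    · simp only [List.mem_singleton] at hx; omega
    · simp at hx
  obtain ⟨R1, R2, R3, R4, R5⟩ := hres
  simp only [Int.toNat_natCast] at R3 R4
  rw [hfold]
  set r := afoldR s 3 ((n1N : Int)) fs1 with hrdef
  -- indicator for the factor 2
  have h2mem : 2 ∈ n.toNat.primeFactors ↔ (2:Int) ∣ n := by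
    rw [Nat.mem_primeFactors]
    constructor
    · rintro ⟨-, hd, -⟩
      have : ((2:Nat) : Int) ∣ ((n.toNat : Nat) : Int) := by exact_mod_cast hd
      rwa [hmN] at this
    · intro hd
      refine ⟨Nat.prime_two, ?_, by omega⟩
      have : ((2:Nat) : Int) ∣ ((n.toNat : Nat) : Int) := by rw [hmN]; exact_mod_cast hd
      exact_mod_cast this
  have hcard1 : n1N.primeFactors.card + (if (2:Int) ∣ n then 1 else 0) = n.toNat.primeFactors.card := by
    rw [hn1def, hn1pf]
    by_cases h2 : (2:Int) ∣ n
    · rw [if_pos h2, Finset.card_erase_of_mem (h2mem.2 h2)]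
      have : 0 < n.toNat.primeFactors.card := Finset.card_pos.2 ⟨2, h2mem.2 h2⟩
      omega
    · rw [if_neg h2, Finset.erase_eq_of_notMem (fun hc => h2 (h2mem.1 hc))]
      omega
  have hfs1len : fs1.length = if (2:Int) ∣ n then 1 else 0 := by
    rw [hfs1def]; split <;> rfl
  have hsplit := filter_card_split n1N.primeFactors s
  by_cases hbig : 1 < r.1
  · -- leftover is an odd prime > s
    have hr1N : r.1 = ((r.1.toNat : Nat) : Int) := by omega
    have hn2 : 1 < r.1.toNat := by omega
    have hn2dvd : r.1.toNat ∣ n1N := by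
      have : r.1 ∣ ((n1N : Nat) : Int) := R2
      rw [hr1N] at this
      exact_mod_cast this
    have hn2prime : r.1.toNat.Prime := by
      by_contra hnp
      have hqp := Nat.minFac_prime (show r.1.toNat ≠ 1 by omega)
      have hqmem : r.1.toNat.minFac ∈ r.1.toNat.primeFactors := by
        rw [Nat.mem_primeFactors]
        exact ⟨hqp, Nat.minFac_dvd _, by omega⟩
      rw [R3] at hqmem
      have hlt : s < (r.1.toNat.minFac : Int) := (Finset.mem_filter.1 hqmem).2
      have hsq : Nat.sqrt n1N < r.1.toNat.minFac := by
        rw [hsN] at hlt; exact_mod_cast hlt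
      have h1 : n1N < r.1.toNat.minFac * r.1.toNat.minFac := by
        have h0 := Nat.sqrt_lt'.1 hsq
        rw [pow_two] at h0
        omega
      have h2 : r.1.toNat.minFac * r.1.toNat.minFac ≤ r.1.toNat :=
        (Nat.minFac_sq_le_self (by omega) hnp).trans_eq' (by ring)
      have h3 : r.1.toNat ≤ n1N := Nat.le_of_dvd (by omega) hn2dvd
      omega
    have hpfr : r.1.toNat.primeFactors = {r.1.toNat} := hn2prime.primeFactors
    have hne2 : r.1.toNat ≠ 2 := by
      intro he
      exact hn1not2 (he ▸ hn2dvd)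
    have h2lt : 2 < r.1 := by
      have := hn2prime.two_le
      omega
    have hsr : s < r.1 := by
      have : r.1.toNat ∈ r.1.toNat.primeFactors := by rw [hpfr]; simp
      rw [R3] at this
      have := (Finset.mem_filter.1 this).2
      omega
    have hnotmem : r.1 ∉ r.2 := by
      intro hc
      rcases R5 r.1 hc with h | h
      · rw [hfs1def] at h
        split at h
        · simp only [List.mem_singleton] at h; omega
        · simp at h
      · omega
    rw [if_pos h2lt, set_add_not_mem hnotmem]
    have hcardgt : (Finset.filter (fun q : Nat => s < (q : Int)) n1N.primeFactors).card = 1 := by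
      rw [← R3, hpfr]; simp
    simp only [List.length_append, List.length_singleton, R4, hfs1len]
    by_cases h2 : (2:Int) ∣ n
    · simp only [if_pos h2] at hcard1 ⊢; push_cast; omega
    · simp only [if_neg h2] at hcard1 ⊢; push_cast; omega
  · -- leftover is 1
    have hr1 : r.1 = 1 := by omega
    have hpfr : r.1.toNat.primeFactors = ∅ := by rw [hr1]; simp
    have hcardgt : (Finset.filter (fun q : Nat => s < (q : Int)) n1N.primeFactors).card = 0 := by
      rw [← R3, hpfr]; simp
    rw [if_neg (by omega)]
    simp only [R4, hfs1len]
    by_cases h2 : (2:Int) ∣ n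
    · simp only [if_pos h2] at hcard1 ⊢; push_cast; omega
    · simp only [if_neg h2] at hcard1 ⊢; push_cast; omega

-- marking pass of the sieve
lemma markFold : ∀ (ms : List Int) (C : List Bool), (∀ e ∈ ms, 0 ≤ e) →
    (ms.foldl (fun l m => PySem.List.pySetD l m true) C).length = C.length ∧
    ∀ j : Nat, ((ms.foldl (fun l m => PySem.List.pySetD l m true) C).getD j false = true ↔
      (C.getD j false = true ∨ ((j : Int) ∈ ms ∧ j < C.length))) := by
  intro ms
  induction ms with
  | nil => intro C h; simp
  | cons e tl ih =>
    intro C h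
    have he : 0 ≤ e := h e (List.mem_cons_self ..)
    simp only [List.foldl_cons]
    have hset : PySem.List.pySetD C e true = C.set e.toNat true :=
      PySem.List.pySetD_of_nonneg C true he
    obtain ⟨ihlen, ihgetD⟩ := ih (C.set e.toNat true) (fun x hx => h x (List.mem_cons_of_mem _ hx))
    rw [hset]
    constructor
    · rw [ihlen, List.length_set]
    · intro j
      rw [ihgetD j, List.length_set]
      have hgd : (C.set e.toNat true).getD j false = true ↔
          (C.getD j false = true ∨ (j = e.toNat ∧ j < C.length)) := by
        simp only [List.getD_eq_getElem?_getD, List.getElem?_set]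
        by_cases heq : e.toNat = j
        · rw [if_pos heq, heq]
          by_cases hlt : j < C.length
          · rw [if_pos hlt]
            constructor
            · intro _; exact Or.inr ⟨rfl, hlt⟩
            · intro _; rfl
          · rw [if_neg hlt]
            constructor
            · intro hh; simp at hh
            · rintro (hh | hh)
              · rw [List.getElem?_eq_none (by omega : C.length ≤ j)] at hh
                simp at hh
              · omega
        · rw [if_neg heq]
          constructor
          · intro hh; exact Or.inl hh
          · rintro (hh | hh)
            · exact hh
            · omega
      rw [hgd]
      have hmem : (j : Int) ∈ e :: tl ↔ ((j : Int) = e ∨ (j : Int) ∈ tl) := List.mem_cons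
      constructor
      · rintro ((hh | hh) | hh)
        · exact Or.inl hh
        · exact Or.inr ⟨hmem.2 (Or.inl (by omega)), hh.2⟩
        · exact Or.inr ⟨hmem.2 (Or.inr hh.1), hh.2⟩
      · rintro (hh | hh)
        · exact Or.inl (Or.inl hh)
        · rcases hmem.1 hh.1 with h' | h'
          · exact Or.inl (Or.inr ⟨by omega, hh.2⟩)
          · exact Or.inr ⟨h', hh.2⟩

lemma composite_char (nN : Nat) (h2 : 2 ≤ nN) :
    (∃ q : Nat, q.Prime ∧ q < nN ∧ q ∣ nN ∧ q * q ≤ nN) ↔ ¬ nN.Prime := by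
  constructor
  · rintro ⟨q, hqp, hlt, hdvd, -⟩
    intro hp
    rcases (Nat.Prime.eq_one_or_self_of_dvd hp q hdvd) with h | h
    · exact hqp.one_lt.ne' h
    · omega
  · intro hnp
    refine ⟨nN.minFac, Nat.minFac_prime (by omega), ?_, Nat.minFac_dvd _, ?_⟩
    · exact (Nat.not_prime_iff_minFac_lt h2).mp hnp
    · have := Nat.minFac_sq_le_self (by omega) hnp
      rw [pow_two] at this
      exact this

-- the sieve loop invariant after processing candidates 2, …, j-1
def sieveInvP (limit j : Int) (st : List Bool × List Int) : Prop :=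
  st.1.length = (limit + 1).toNat ∧
  (∀ mN : Nat, mN < (limit + 1).toNat →
    (st.1.getD mN false = true ↔ ∃ q : Nat, q.Prime ∧ (q : Int) < j ∧ q ∣ mN ∧ q * q ≤ mN)) ∧
  (∀ z, z ∈ st.2 ↔ ∃ q : Nat, z = (q : Int) ∧ q.Prime ∧ (q : Int) < j) ∧
  st.2.Pairwise (· < ·) ∧ (∀ z ∈ st.2, z < j)

lemma sieveInv (limit : Int) : ∀ jN : Nat, 2 + (jN : Int) ≤ limit + 1 →
    sieveInvP limit (2 + (jN : Int))
      ((PySem.List.pyRange 2 (2 + (jN : Int)) 1).foldl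
        (fun st p =>
          if PySem.List.pyGetD st.1 p false then st
          else
            ((PySem.List.pyRange (p * p) (limit + 1) p).foldl
                (fun l m => PySem.List.pySetD l m true) st.1,
              st.2 ++ [p]))
        (PySem.List.pyRepeat [false] (limit + 1), [])) := by
  intro jN
  induction jN with
  | zero =>
    intro hle
    have hnil : PySem.List.pyRange 2 (2 + ((0:Nat) : Int)) 1 = [] := by
      apply PySem.List.pyRange_one_eq_nil
      omega
    rw [hnil]
    simp only [List.foldl_nil]
    refine ⟨?_, ?_, ?_, ?_, ?_⟩
    · rw [PySem.List.pyRepeat_singleton, List.length_replicate]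
    · intro mN hm
      rw [PySem.List.pyRepeat_singleton]
      constructor
      · intro hh
        exfalso
        rw [List.getD_eq_getElem?_getD, List.getElem?_replicate] at hh
        split at hh <;> simp at hh
      · rintro ⟨q, hq, hlt, -, -⟩
        have := hq.two_le
        exfalso
        push_cast at hlt
        omega
    · intro z
      simp only [List.not_mem_nil, false_iff, not_exists]
      rintro q ⟨-, hq, hlt⟩
      have := hq.two_le
      push_cast at hlt
      omega
    · exact List.Pairwise.nil
    · intro z hz; simp at hz
  | succ jN ih =>
    intro hle
    have hsplit : PySem.List.pyRange 2 (2 + ((jN + 1 : Nat) : Int)) 1 =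
        PySem.List.pyRange 2 (2 + (jN : Int)) 1 ++ [2 + (jN : Int)] := by
      have : (2 + ((jN + 1 : Nat) : Int)) = (2 + (jN : Int)) + 1 := by push_cast; omega
      rw [this]
      exact PySem.List.pyRange_one_succ_right (by omega)
    rw [hsplit, List.foldl_append]
    obtain ⟨I1, I2, I3, I4, I5⟩ := ih (by push_cast at hle ⊢; omega)
    set st := (PySem.List.pyRange 2 (2 + (jN : Int)) 1).foldl
        (fun st p =>
          if PySem.List.pyGetD st.1 p false then st
          else
            ((PySem.List.pyRange (p * p) (limit + 1) p).foldl
                (fun l m => PySem.List.pySetD l m true) st.1,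
              st.2 ++ [p]))
        (PySem.List.pyRepeat [false] (limit + 1), []) with hstdef
    simp only [List.foldl_cons, List.foldl_nil]
    set j : Int := 2 + (jN : Int) with hjdef
    have hj2 : 2 ≤ j := by omega
    have hjlim : j ≤ limit := by push_cast at hle; omega
    set JN : Nat := 2 + jN with hJNdef
    have hjJN : j = (JN : Int) := by omega
    have hJNlt : JN < (limit + 1).toNat := by omega
    have htest : PySem.List.pyGetD st.1 j false = st.1.getD JN false := by
      rw [hjJN, PySem.List.pyGetD_natCast]
    have htestIff : st.1.getD JN false = true ↔ ¬ JN.Prime := by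
      rw [I2 JN hJNlt, ← composite_char JN (by omega)]
      constructor
      · rintro ⟨q, hq, hlt, hdvd, hsq⟩
        refine ⟨q, hq, ?_, hdvd, hsq⟩
        rw [hjJN] at hlt
        exact_mod_cast hlt
      · rintro ⟨q, hq, hlt, hdvd, hsq⟩
        refine ⟨q, hq, ?_, hdvd, hsq⟩
        rw [hjJN]
        exact_mod_cast hlt
    by_cases hcomp : st.1.getD JN false = true
    · -- candidate j is composite: skipped
      rw [htest, if_pos hcomp]
      have hJNnp : ¬ JN.Prime := htestIff.1 hcomp
      refine ⟨I1, ?_, ?_, I4, ?_⟩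
      · intro mN hm
        rw [I2 mN hm]
        constructor
        · rintro ⟨q, hq, hlt, hdvd, hsq⟩
          exact ⟨q, hq, by push_cast at hlt ⊢; omega, hdvd, hsq⟩
        · rintro ⟨q, hq, hlt, hdvd, hsq⟩
          refine ⟨q, hq, ?_, hdvd, hsq⟩
          rcases lt_or_eq_of_le (show (q:Int) ≤ j by push_cast at hlt ⊢; omega) with h' | h'
          · exact h'
          · exfalso
            apply hJNnp
            have : q = JN := by rw [hjJN] at h'; exact_mod_cast h'
            rwa [← this]
      · intro z
        rw [I3 z]
        constructor
        · rintro ⟨q, rfl, hq, hlt⟩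
          exact ⟨q, rfl, hq, by omega⟩
        · rintro ⟨q, rfl, hq, hlt⟩
          refine ⟨q, rfl, hq, ?_⟩
          rcases lt_or_eq_of_le (show (q:Int) ≤ j by omega) with h' | h'
          · exact h'
          · exfalso
            apply hJNnp
            have : q = JN := by rw [hjJN] at h'; exact_mod_cast h'
            rwa [← this]
      · intro z hz
        have := I5 z hz
        omega
    · -- candidate j is prime: append it and mark its multiples from j*j
      rw [htest, if_neg hcomp]
      have hJNp : JN.Prime := by
        by_contra hnp
        exact hcomp (htestIff.2 hnp)
      have hrange_nonneg : ∀ e ∈ PySem.List.pyRange (j * j) (limit + 1) j, 0 ≤ e := by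
        intro e he
        rw [PySem.List.mem_pyRange_iff_of_pos (by omega)] at he
        nlinarith [he.1]
      obtain ⟨Mlen, MgetD⟩ := markFold (PySem.List.pyRange (j * j) (limit + 1) j) st.1 hrange_nonneg
      refine ⟨by rw [Mlen, I1], ?_, ?_, ?_, ?_⟩
      · intro mN hm
        rw [MgetD mN, I2 mN hm, I1]
        have hmem : ((mN : Int) ∈ PySem.List.pyRange (j * j) (limit + 1) j ∧ mN < (limit+1).toNat) ↔
            (JN ∣ mN ∧ JN * JN ≤ mN ∧ mN < (limit+1).toNat) := by
          rw [PySem.List.mem_pyRange_iff_of_pos (by omega)]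
          constructor
          · rintro ⟨⟨hge, hlt, hdvd⟩, hm'⟩
            have hdvd' : j ∣ (mN : Int) := by
              have h1 : j ∣ (mN : Int) - j * j := hdvd
              have h2 : (mN : Int) = ((mN : Int) - j * j) + j * j := by ring
              rw [h2]
              exact dvd_add h1 (Dvd.intro j rfl)
            refine ⟨?_, ?_, hm'⟩
            · rw [hjJN] at hdvd'
              exact_mod_cast hdvd'
            · have h3 := hge
              rw [hjJN] at h3
              exact_mod_cast h3
          · rintro ⟨hdvd, hsq, hm'⟩
            refine ⟨⟨?_, ?_, ?_⟩, hm'⟩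
            · have : ((JN * JN : Nat) : Int) ≤ (mN : Int) := by exact_mod_cast hsq
              rw [hjJN]
              exact_mod_cast this
            · omega
            · have hdvd' : j ∣ (mN : Int) := by
                rw [hjJN]
                exact_mod_cast hdvd
              exact dvd_sub hdvd' (Dvd.intro j rfl)
        rw [hmem]
        constructor
        · rintro (⟨q, hq, hlt, hdvd, hsq⟩ | ⟨hdvd, hsq, -⟩)
          · exact ⟨q, hq, by push_cast at hlt ⊢; omega, hdvd, hsq⟩
          · exact ⟨JN, hJNp, by push_cast; omega, hdvd, hsq⟩
        · rintro ⟨q, hq, hlt, hdvd, hsq⟩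
          have hq2 : (q : Int) ≤ j := by push_cast at hlt ⊢; omega
          rcases lt_or_eq_of_le hq2 with h' | h'
          · exact Or.inl ⟨q, hq, h', hdvd, hsq⟩
          · have hqJ : q = JN := by rw [hjJN] at h'; exact_mod_cast h'
            subst hqJ
            exact Or.inr ⟨hdvd, hsq, hm⟩
      · intro z
        rw [List.mem_append, List.mem_singleton, I3 z]
        constructor
        · rintro (⟨q, rfl, hq, hlt⟩ | rfl)
          · exact ⟨q, rfl, hq, by push_cast at hlt ⊢; omega⟩
          · exact ⟨JN, hjJN, hJNp, by rw [← hjJN]; push_cast; omega⟩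
        · rintro ⟨q, rfl, hq, hlt⟩
          have hq2 : (q : Int) ≤ j := by push_cast at hlt ⊢; omega
          rcases lt_or_eq_of_le hq2 with h' | h'
          · exact Or.inl ⟨q, rfl, hq, h'⟩
          · exact Or.inr h'
      · rw [List.pairwise_append]
        refine ⟨I4, List.pairwise_singleton _ _, ?_⟩
        intro x hx y hy
        rw [List.mem_singleton] at hy
        subst hy
        exact I5 x hx
      · intro z hz
        rcases List.mem_append.1 hz with h' | h'
        · have := I5 z h'
          push_cast
          omega
        · rw [List.mem_singleton] at h'
          subst h'
          push_cast
          omega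

lemma sieve_spec (limit : Int) (hl : 1 ≤ limit) :
    (∀ z, z ∈ pvSieve limit ↔ ∃ q : Nat, z = (q : Int) ∧ q.Prime ∧ (q : Int) ≤ limit) ∧
    (pvSieve limit).Pairwise (· < ·) := by
  have h := sieveInv limit (limit - 1).toNat (by omega)
  have heq : (2 + (((limit - 1).toNat : Nat) : Int)) = limit + 1 := by omega
  rw [heq] at h
  obtain ⟨-, -, I3, I4, -⟩ := h
  have I3' : ∀ z, z ∈ pvSieve limit ↔ ∃ q : Nat, z = (q : Int) ∧ q.Prime ∧ (q : Int) < limit + 1 := I3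
  have I4' : (pvSieve limit).Pairwise (· < ·) := I4
  refine ⟨?_, I4'⟩
  intro z
  rw [I3' z]
  constructor
  · rintro ⟨q, rfl, hq, hlt⟩
    exact ⟨q, rfl, hq, by omega⟩
  · rintro ⟨q, rfl, hq, hle⟩
    exact ⟨q, rfl, hq, by omega⟩

lemma indicator_eq_card (n : Int) (h1 : 1 ≤ n)
    (h : ∀ q : Nat, q.Prime → (q : Int) ∣ n → n < (q : Int) * (q : Int)) :
    (if 1 < n then (1:Int) else 0) = (n.toNat.primeFactors.card : Int) := by
  have hN : ((n.toNat : Nat) : Int) = n := by omega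
  have hc := card_primeFactors_of_large n.toNat (by omega) ?inner
  case inner =>
    intro q hq hd
    have hdi : (q : Int) ∣ n := by rw [← hN]; exact_mod_cast hd
    have hlt := h q hq hdi
    have h2 : ((n.toNat : Nat) : Int) < ((q * q : Nat) : Int) := by
      rw [hN]; push_cast; exact hlt
    exact_mod_cast h2
  rw [hc]
  by_cases h1n : 1 < n
  · rw [if_pos h1n, if_pos (by omega)]; norm_num
  · rw [if_neg h1n, if_neg (by omega)]; norm_num

lemma bgo : ∀ (ps : List Int) (n c : Int), 1 ≤ n →
    (∀ z ∈ ps, ∃ q : Nat, z = (q : Int) ∧ q.Prime) →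
    ps.Pairwise (· < ·) →
    (∀ q : Nat, q.Prime → (q : Int) ∣ n → ((q : Int) ∈ ps ∨ n < (q : Int) * (q : Int))) →
    (pvOmegaGo ps n c).2 + (if 1 < (pvOmegaGo ps n c).1 then (1:Int) else 0) =
      c + (n.toNat.primeFactors.card : Int) := by
  intro ps
  induction ps with
  | nil =>
    intro n c h1 _ _ h3
    simp only [pvOmegaGo]
    show c + (if 1 < n then (1:Int) else 0) = c + (n.toNat.primeFactors.card : Int)
    rw [indicator_eq_card n h1 (fun q hq hd => by
      rcases h3 q hq hd with hm | hlt
      · simp at hm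
      · exact hlt)]
  | cons p ps ih =>
    intro n c h1 H1 H2 H3
    obtain ⟨q0, rfl, hq0⟩ := H1 p (List.mem_cons_self ..)
    have hq02 : 2 ≤ q0 := hq0.two_le
    have hp2 : (2:Int) ≤ (q0 : Int) := by exact_mod_cast hq02
    simp only [pvOmegaGo]
    by_cases hbr : (q0 : Int) * (q0 : Int) > n
    · simp only [if_pos hbr]
      show c + (if 1 < n then (1:Int) else 0) = c + (n.toNat.primeFactors.card : Int)
      rw [indicator_eq_card n h1 (fun q hq hd => by
        rcases H3 q hq hd with hm | hlt
        · rcases List.mem_cons.1 hm with he | hm'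
          · have : q = q0 := by exact_mod_cast he
            subst this
            omega
          · have hlt' : (q0 : Int) < (q : Int) := (List.pairwise_cons.1 H2).1 _ hm'
            have := mul_self_lt_mul_self (by omega : (0:Int) ≤ (q0:Int)) hlt'
            omega
        · exact hlt)]
    · simp only [if_neg hbr]
      by_cases hdvd : PySem.Int.mod n (q0 : Int) = 0
      · simp only [if_pos hdvd]
        have hdv : (q0 : Int) ∣ n := (PySem.Int.mod_eq_zero_iff_dvd n _).1 hdvd
        have hNdvd : q0 ∣ n.toNat := by
          have : ((q0 : Nat) : Int) ∣ ((n.toNat : Nat) : Int) := by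
            rw [show ((n.toNat : Nat) : Int) = n by omega]; exact hdv
          exact_mod_cast this
        have hstrip : pvStrip (q0 : Int) n = ((sstrip q0 n.toNat : Nat) : Int) := by
          rw [pvStrip_eq_sstrip _ _ hp2 h1]
          norm_num
        have hspos : 1 ≤ sstrip q0 n.toNat := sstrip_pos (by omega)
        have hspf : (sstrip q0 n.toNat).primeFactors = n.toNat.primeFactors.erase q0 :=
          sstrip_primeFactors hq0 (by omega)
        have hq0mem : q0 ∈ n.toNat.primeFactors :=
          Nat.mem_primeFactors.2 ⟨hq0, hNdvd, by omega⟩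
        have hsdvd : sstrip q0 n.toNat ∣ n.toNat := sstrip_dvd _ _
        rw [hstrip]
        have IH := ih ((sstrip q0 n.toNat : Nat) : Int) (c + 1) (by exact_mod_cast hspos)
          (fun z hz => H1 z (List.mem_cons_of_mem _ hz)) (List.pairwise_cons.1 H2).2 ?H3'
        case H3' =>
          intro q hq hd
          have hqN : q ∣ sstrip q0 n.toNat := by exact_mod_cast hd
          have hqn : (q : Int) ∣ n := by
            have h' : q ∣ n.toNat := hqN.trans hsdvd
            have : ((q : Nat) : Int) ∣ ((n.toNat : Nat) : Int) := by exact_mod_cast h'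
            rwa [show ((n.toNat : Nat) : Int) = n by omega] at this
          rcases H3 q hq hqn with hm | hlt
          · rcases List.mem_cons.1 hm with he | hm'
            · exfalso
              have : q = q0 := by exact_mod_cast he
              subst this
              exact sstrip_not_dvd (by omega) (by omega) hqN
            · exact Or.inl hm'
          · refine Or.inr ?_
            have hle : sstrip q0 n.toNat ≤ n.toNat := Nat.le_of_dvd (by omega) hsdvd
            have : (((sstrip q0 n.toNat : Nat)) : Int) ≤ n := by
              rw [show n = ((n.toNat : Nat) : Int) by omega]
              exact_mod_cast hle
            omega
        rw [IH]
        have hcards : (sstrip q0 n.toNat).primeFactors.card = n.toNat.primeFactors.card - 1 := by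
          rw [hspf, Finset.card_erase_of_mem hq0mem]
        have hpos : 0 < n.toNat.primeFactors.card := Finset.card_pos.2 ⟨q0, hq0mem⟩
        rw [Int.toNat_natCast, hcards]
        push_cast [hpos]
        omega
      · simp only [if_neg hdvd]
        apply ih n c h1 (fun z hz => H1 z (List.mem_cons_of_mem _ hz)) (List.pairwise_cons.1 H2).2
        intro q hq hd
        rcases H3 q hq hd with hm | hlt
        · rcases List.mem_cons.1 hm with he | hm'
          · exfalso
            apply hdvd
            rw [PySem.Int.mod_eq_zero_iff_dvd, ← he]
            exact hd
          · exact Or.inl hm'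
        · exact Or.inr hlt

lemma pvOmega_eq (M n : Int) (h1 : 1 ≤ n) (hM : n ≤ M) :
    pvOmega (pvSieve ((Nat.sqrt M.toNat : Nat) : Int)) n = (n.toNat.primeFactors.card : Int) := by
  have hM1 : 1 ≤ M := le_trans h1 hM
  have hsq1 : 1 ≤ Nat.sqrt M.toNat := by
    rw [Nat.le_sqrt]
    omega
  have hl : 1 ≤ ((Nat.sqrt M.toNat : Nat) : Int) := by exact_mod_cast hsq1
  obtain ⟨S1, S2⟩ := sieve_spec _ hl
  have key := bgo (pvSieve ((Nat.sqrt M.toNat : Nat) : Int)) n 0 h1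
    (fun z hz => ((S1 z).1 hz).imp fun q hq => ⟨hq.1, hq.2.1⟩) S2 ?H3
  case H3 =>
    intro q hq hd
    by_cases hle : (q : Int) ≤ ((Nat.sqrt M.toNat : Nat) : Int)
    · exact Or.inl ((S1 _).2 ⟨q, rfl, hq, hle⟩)
    · right
      have hq' : Nat.sqrt M.toNat < q := by exact_mod_cast not_le.1 hle
      have h0 := Nat.sqrt_lt'.1 hq'
      rw [pow_two] at h0
      have h2 : ((M.toNat : Nat) : Int) < ((q * q : Nat) : Int) := by exact_mod_cast h0
      push_cast at h2
      have h3 : ((M.toNat : Nat) : Int) = M := by omega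
      rw [h3] at h2
      omega
  show (if 1 < (pvOmegaGo (pvSieve ((Nat.sqrt M.toNat : Nat) : Int)) n 0).1 then
      (pvOmegaGo (pvSieve ((Nat.sqrt M.toNat : Nat) : Int)) n 0).2 + 1 else
      (pvOmegaGo (pvSieve ((Nat.sqrt M.toNat : Nat) : Int)) n 0).2) = (n.toNat.primeFactors.card : Int)
  by_cases hb : 1 < (pvOmegaGo (pvSieve ((Nat.sqrt M.toNat : Nat) : Int)) n 0).1
  · rw [if_pos hb]
    rw [if_pos hb] at key
    omega
  · rw [if_neg hb]
    rw [if_neg hb] at key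
    omega

lemma slice_min_len (xs : List (Int × Int)) (k : Int) :
    PySem.List.slice xs none (some (min k (PySem.List.len xs))) =
      PySem.List.slice xs none (some k) := by
  have hlen : PySem.List.len xs = (xs.length : Int) := PySem.List.len_eq xs
  by_cases hk : (0:Int) ≤ k
  case neg => rw [min_eq_left (by omega)]
  · rw [PySem.List.slice_to xs (by omega : (0:Int) ≤ min k (PySem.List.len xs)),
        PySem.List.slice_to xs hk]
    by_cases h : k ≤ PySem.List.len xs
    · rw [min_eq_left h]
    · rw [min_eq_right (by omega)]
      rw [List.take_of_length_le (by omega), List.take_of_length_le (by omega)]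

lemma slice_nil_eq (b : Int) : PySem.List.slice ([] : List (Int × Int)) none (some b) = [] := by
  rw [List.eq_nil_iff_forall_not_mem]
  intro x hx
  have := PySem.List.mem_of_mem_slice _ _ _ hx
  simp at this

lemma ports_agree : ∀ (nums : List Int) (k : Int),
    (∀ x ∈ nums, 1 ≤ x) → maximumScore_fails nums k = maximumScore_fails_alt nums k := by
  intro nums k hpre
  cases nums with
  | nil =>
    show PySem.Int.mod ((PySem.List.slice
        (PySem.List.sorted2 (([] : List Int).map fun n => (pvPrimScore n, n)) Prod.fst Prod.snd true)
        none (some (min k (PySem.List.len (PySem.List.sorted2 (([] : List Int).map fun n => (pvPrimScore n, n)) Prod.fst Prod.snd true))))).foldl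
        (fun acc ij => acc * ij.2) 1) (10 ^ 5 + 7) = 1
    have hs : PySem.List.sorted2 (([] : List Int).map fun n => (pvPrimScore n, n)) Prod.fst Prod.snd true = [] := by
      rfl
    rw [hs, slice_nil_eq]
    rfl
  | cons x t =>
    have hM := PySem.List.le_foldl_max t x
    have hmap : (x :: t).map (fun n => (pvPrimScore n, n)) =
        (x :: t).map (fun n => (pvOmega (pvSieve ((Nat.sqrt ((t.foldl max x).toNat) : Nat) : Int)) n, n)) := by
      apply List.map_congr_left
      intro a ha
      have h1 : 1 ≤ a := hpre a ha
      have hle : a ≤ t.foldl max x := by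
        rcases List.mem_cons.1 ha with rfl | h'
        · exact hM.1
        · exact hM.2 a h'
      rw [primScore_eq a h1, pvOmega_eq (t.foldl max x) a h1 hle]
    show PySem.Int.mod ((PySem.List.slice
        (PySem.List.sorted2 ((x :: t).map fun n => (pvPrimScore n, n)) Prod.fst Prod.snd true)
        none (some (min k (PySem.List.len (PySem.List.sorted2 ((x :: t).map fun n => (pvPrimScore n, n)) Prod.fst Prod.snd true))))).foldl
        (fun acc ij => acc * ij.2) 1) (10 ^ 5 + 7) =
      PySem.Int.mod ((PySem.List.slice
        (PySem.List.sorted2 ((x :: t).map fun n => (pvOmega (pvSieve ((Nat.sqrt ((t.foldl max x).toNat) : Nat) : Int)) n, n)) Prod.fst Prod.snd true)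
        none (some k)).foldl (fun acc p => acc * p.2) 1) (10 ^ 5 + 7)
    rw [hmap, slice_min_len]

-- ===== VERDICT (by name: the statement is the Claim_ definition above) =====
theorem maximumScore_fails_spec : Claim_equal_maximumScore_fails := by
  intro nums k hdom hpre
  unfold Spec_maximumScore_fails
  exact ports_agree nums k hpre
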